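-- pv_equiv track=rewrite | github.com/YDucrest/yes-debate-scheduler | debate_scheduler.py | capacities_with_free_spread_at_end
-- ===== SOURCE A (Python) =====
-- import math
-- from typing import List, Tuple, Dict, Set, Optional
--
-- def capacities_with_free_spread_at_end(
--     rooms: int, total_matches: int, min_sessions: int
-- ) -> List[int]:
--     """
--     Compute per-session capacities so that:
--       - we use exactly 'min_sessions' sessions initially,
--       - earlier sessions are as full as possible,
--       - any free rooms are spread across the LAST sessions (not only the very last).
--     """
--     S = max(2, min_sessions)
--     total_capacity = S * rooms
--     if total_capacity < total_matches:
--         # not enough sessions, bump S to fit all matches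
--         S = math.ceil(total_matches / rooms)
--         total_capacity = S * rooms
--
--     # Start with full capacity for all sessions.
--     caps = [rooms] * S
--     free_slots = total_capacity - total_matches  # how many empty slots we must leave overall
--     # Spread free slots across the last sessions: 1 per session from the end
--     i = S - 1
--     while free_slots > 0 and i >= 0:
--         if caps[i] > 0:
--             caps[i] -= 1
--             free_slots -= 1
--         i -= 1
--         if i < 0 and free_slots > 0:
--             i = S - 1  # wrap again if more free than sessions (very rare)
--     return caps
-- ===== SOURCE B (Python) =====
-- def capacities_with_free_spread_at_end(
--     rooms: int, total_matches: int, min_sessions: int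
-- ) -> list:
--     # Closed form: instead of peeling free slots one by one, every session
--     # loses q = free // S rooms and the last r = free % S sessions lose one more.
--     S = max(2, min_sessions)
--     if S * rooms < total_matches:
--         S = -(-total_matches // rooms)  # exact ceiling division
--     free = S * rooms - total_matches
--     q, r = divmod(free, S)
--     return [rooms - q] * (S - r) + [rooms - q - 1] * r
-- ===== Notes on version B (the rewrite author's own statement) =====
-- stated objective: faster
-- what changed: Replaces A's per-slot decrement loop (one iteration per free slot, wrapping over the sessions) with a closed form: divmod(free, S) gives q rooms off every session and one more off the last r sessions, built with list repetition.
-- outside the precondition, e.g. on capacities_with_free_spread_at_end(-5, 3, 2): A returns [], B raises ZeroDivisionError; on capacities_with_free_spread_at_end(-5, -7, 2): A returns [-5, -5], B returns [-3, -4]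
import Mathlib
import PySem

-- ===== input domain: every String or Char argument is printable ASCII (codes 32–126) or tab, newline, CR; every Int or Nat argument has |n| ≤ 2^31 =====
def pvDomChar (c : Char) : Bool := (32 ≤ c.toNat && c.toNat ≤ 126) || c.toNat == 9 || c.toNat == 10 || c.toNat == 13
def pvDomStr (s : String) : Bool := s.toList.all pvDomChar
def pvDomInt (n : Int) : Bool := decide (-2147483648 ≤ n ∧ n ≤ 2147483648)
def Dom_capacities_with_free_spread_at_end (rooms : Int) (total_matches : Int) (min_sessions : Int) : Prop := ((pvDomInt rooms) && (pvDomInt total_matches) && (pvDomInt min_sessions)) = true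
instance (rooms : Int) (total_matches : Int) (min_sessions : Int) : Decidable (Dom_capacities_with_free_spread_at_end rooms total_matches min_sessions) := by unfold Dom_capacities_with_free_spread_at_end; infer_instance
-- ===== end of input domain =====

-- B replaces A's one-decrement-per-free-slot loop with a closed-form divmod (asymptotically faster);
-- equivalence is claimed on Pre_: the natural domain rooms ≥ 1, total_matches ≥ 0, plus the
-- degenerate region of negative rooms where both programs return [].

-- ===== PORT A =====
-- A's while loop, with fuel making it total: inside Pre_ the loop runs exactly free_slots
-- iterations (the guard caps[i] > 0 is always true there), so fuel = free_slots.toNat + 1 suffices;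
-- outside Pre_ the Python loop may never terminate.
-- caps is a Python list = a mutable array; ported as Array Int (O(1) read/update, like CPython).
-- Whenever the body runs, 0 ≤ i < S = caps.size, so caps.getD i.toNat 0 / caps.setIfInBounds are
-- exactly Python's caps[i] read and write (i.toNat = i since 0 ≤ i).
def capLoopA (fuel : Nat) (S : Int) (caps : Array Int) (free : Int) (i : Int) : Array Int :=
  match fuel with
  | 0 => caps
  | Nat.succ f =>
    if free > 0 ∧ i ≥ 0 then
      let hit := caps.getD i.toNat 0 > 0
      let caps' := if hit then caps.setIfInBounds i.toNat (caps.getD i.toNat 0 - 1) else caps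
      let free' := if hit then free - 1 else free
      let i' := i - 1
      let i'' := if i' < 0 ∧ free' > 0 then S - 1 else i'
      capLoopA f S caps' free' i''
    else caps

def capacities_with_free_spread_at_end (rooms : Int) (total_matches : Int) (min_sessions : Int) : List Int :=
  let S0 := max 2 min_sessions
  let tc0 := S0 * rooms
  -- math.ceil(total_matches / rooms) ported as exact ceiling division -((-tm) // rooms):
  -- exact for the |n| ≤ 2^31 integers of Dom_ (float division is correctly rounded there).
  let S := if tc0 < total_matches then -(PySem.Int.floordiv (-total_matches) rooms) else S0
  let total_capacity := if tc0 < total_matches then S * rooms else tc0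
  let caps := Array.replicate S.toNat rooms
  let free_slots := total_capacity - total_matches
  (capLoopA (free_slots.toNat + 1) S caps free_slots (S - 1)).toList

-- ===== PORT B =====
-- q, r = divmod(free, S): PySem.Int.divmod? is none exactly where Python raises
-- ZeroDivisionError (S = 0, outside Pre_); there the port returns [].
def capacities_with_free_spread_at_end_alt (rooms : Int) (total_matches : Int) (min_sessions : Int) : List Int :=
  let S0 := max 2 min_sessions
  let S := if S0 * rooms < total_matches then -(PySem.Int.floordiv (-total_matches) rooms) else S0
  let free := S * rooms - total_matches
  match PySem.Int.divmod? free S with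
  | none => []
  | some (q, r) =>
    List.replicate (S - r).toNat (rooms - q) ++ List.replicate r.toNat (rooms - q - 1)

-- ===== PRECONDITION & SPEC =====
-- Pre_ excludes only inputs where A does not return a sensible value of the type or B raises:
-- rooms = 0 with matches to place (A raises ZeroDivisionError), rooms ≥ 1 with negative
-- total_matches (A loops forever), and the negative-rooms band where A returns [] or meaningless
-- negative 'capacities' outside the task's natural domain while B's divmod raises or disagrees.
-- It admits the whole natural domain rooms ≥ 1 ∧ total_matches ≥ 0, unbounded, plus every
-- degenerate input where both programs agree: rooms ≤ -1 ∧ -rooms ≤ total_matches (both return [])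
-- and the exact-fit cases with no free slot (total_matches = S*rooms), where both return [rooms]*S.
def Pre_capacities_with_free_spread_at_end (rooms : Int) (total_matches : Int) (min_sessions : Int) : Prop :=
  (1 ≤ rooms ∧ 0 ≤ total_matches) ∨ (rooms ≤ -1 ∧ -rooms ≤ total_matches) ∨
  (total_matches = (max 2 min_sessions) * rooms) ∨
  (rooms ≤ -1 ∧ total_matches ≤ -1 ∧ (max 2 min_sessions) * rooms < total_matches ∧ rooms ∣ total_matches)
instance (rooms : Int) (total_matches : Int) (min_sessions : Int) : Decidable (Pre_capacities_with_free_spread_at_end rooms total_matches min_sessions) := by unfold Pre_capacities_with_free_spread_at_end; infer_instance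

def pvWitness_capacities_with_free_spread_at_end : Int × Int × Int := (3, 7, 4)

def Spec_capacities_with_free_spread_at_end (rooms : Int) (total_matches : Int) (min_sessions : Int) (out : List Int) : Prop := out = capacities_with_free_spread_at_end_alt rooms total_matches min_sessions
instance (rooms : Int) (total_matches : Int) (min_sessions : Int) (out : List Int) : Decidable (Spec_capacities_with_free_spread_at_end rooms total_matches min_sessions out) := by unfold Spec_capacities_with_free_spread_at_end; infer_instance

-- ===== CLAIM (what is proved, stated in full; the proofs are below) =====
def Claim_equal_capacities_with_free_spread_at_end : Prop := ∀ (rooms : Int) (total_matches : Int) (min_sessions : Int), Dom_capacities_with_free_spread_at_end rooms total_matches min_sessions → Pre_capacities_with_free_spread_at_end rooms total_matches min_sessions → Spec_capacities_with_free_spread_at_end rooms total_matches min_sessions (capacities_with_free_spread_at_end rooms total_matches min_sessions)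

-- ===== LEMMAS AND PROOFS =====

-- Proof-side mirror of capLoopA over List Int, same step for step.
def capLoopL (fuel : Nat) (S : Int) (caps : List Int) (free : Int) (i : Int) : List Int :=
  match fuel with
  | 0 => caps
  | Nat.succ f =>
    if free > 0 ∧ i ≥ 0 then
      let hit := caps.getD i.toNat 0 > 0
      let caps' := if hit then caps.set i.toNat (caps.getD i.toNat 0 - 1) else caps
      let free' := if hit then free - 1 else free
      let i' := i - 1
      let i'' := if i' < 0 ∧ free' > 0 then S - 1 else i'
      capLoopL f S caps' free' i''
    else caps

theorem arr_getD_toList (a : Array Int) (n : Nat) (d : Int) : a.getD n d = a.toList.getD n d := by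
  unfold Array.getD List.getD
  split <;> simp_all

theorem capLoopA_toList (f : Nat) : ∀ (S : Int) (caps : Array Int) (free i : Int),
    (capLoopA f S caps free i).toList = capLoopL f S caps.toList free i := by
  induction f with
  | zero => intro S caps free i; rfl
  | succ f ih =>
    intro S caps free i
    rw [capLoopA, capLoopL]
    split
    · simp only [arr_getD_toList]
      split <;> rw [ih]
      simp [Array.toList_setIfInBounds]
    · rfl

theorem capLoopL_nonpos (f : Nat) (S : Int) (caps : List Int) (free i : Int)
    (h : free ≤ 0) : capLoopL f S caps free i = caps := by
  cases f with
  | zero => rfl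
  | succ f => simp [capLoopL]; omega

theorem caps_getD (a t : Nat) (c d : Int) (ha : 0 < a) :
    (List.replicate a c ++ List.replicate t d).getD (a-1) 0 = c := by
  obtain ⟨b, rfl⟩ : ∃ b, a = b + 1 := ⟨a-1, by omega⟩
  simp [List.replicate_succ', List.getD, List.append_assoc]

theorem caps_set (a t : Nat) (c d e : Int) (ha : 0 < a) :
    (List.replicate a c ++ List.replicate t d).set (a-1) e
      = List.replicate (a-1) c ++ e :: List.replicate t d := by
  obtain ⟨b, rfl⟩ : ∃ b, a = b + 1 := ⟨a-1, by omega⟩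
  simp [List.replicate_succ', List.append_assoc]

-- The loop invariant: caps = a copies of c then t copies of c-1, current index a-1,
-- free = n remaining decrements; result in closed form with m = n + t total decrements.
theorem capLoopL_closed (f : Nat) : ∀ (n a t : Nat) (c : Int), n ≤ f → 0 < a → 0 < c →
    (n : Int) + t ≤ ((a : Int) + t) * c →
    capLoopL f ((a : Int) + t) (List.replicate a c ++ List.replicate t (c - 1)) (n : Int) ((a : Int) - 1)
      = List.replicate ((a + t) - (n + t) % (a + t)) (c - (((n + t) / (a + t) : Nat) : Int))
        ++ List.replicate ((n + t) % (a + t)) (c - (((n + t) / (a + t) : Nat) : Int) - 1) := by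
  induction f with
  | zero =>
    intro n a t c hn ha hc hb
    obtain rfl : n = 0 := by omega
    rw [capLoopL, Nat.zero_add, Nat.mod_eq_of_lt (by omega), Nat.div_eq_of_lt (by omega)]
    simp
  | succ f ih =>
    intro n a t c hn ha hc hb
    cases n with
    | zero =>
      rw [capLoopL_nonpos _ _ _ _ _ (by simp), Nat.zero_add,
        Nat.mod_eq_of_lt (by omega), Nat.div_eq_of_lt (by omega)]
      simp
    | succ m =>
      rw [capLoopL, if_pos (by constructor <;> [exact_mod_cast Nat.succ_pos m; omega])]
      have hidx : ((a : Int) - 1).toNat = a - 1 := by omega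
      rw [hidx, caps_getD a t c (c-1) ha, caps_set a t c (c-1) (c-1) ha]
      simp only [gt_iff_lt, if_pos hc]
      have hcaps : List.replicate (a-1) c ++ (c-1) :: List.replicate t (c - 1)
          = List.replicate (a-1) c ++ List.replicate (t+1) (c - 1) := by
        simp [List.replicate_succ]
      have hfree : ((m + 1 : Nat) : Int) - 1 = ((m : Nat) : Int) := by push_cast; ring
      rw [hcaps, hfree]
      by_cases h2 : 2 ≤ a
      · -- no wrap: index a-2 ≥ 0
        rw [if_neg (by omega)]
        have hside : ((m : Nat) : Int) + ((t+1 : Nat) : Int) ≤ (((a-1 : Nat) : Int) + ((t+1 : Nat) : Int)) * c := by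
          push_cast [Nat.cast_sub (by omega : 1 ≤ a)] at hb ⊢
          have heq : ((a:Int) - 1 + ((t:Int) + 1)) * c = ((a:Int) + (t:Int)) * c := by ring
          rw [heq]; linarith
        have hS : ((a : Int) + t) = (((a-1 : Nat) : Int) + ((t+1 : Nat) : Int)) := by
          push_cast [Nat.cast_sub (by omega : 1 ≤ a)]; ring
        have hI : (a : Int) - 1 - 1 = ((a - 1 : Nat) : Int) - 1 := by omega
        rw [hS, hI, ih m (a-1) (t+1) c (by omega) (by omega) hc hside]
        have h1 : (a - 1) + (t + 1) = a + t := by omega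
        have h2 : m + (t + 1) = (m + 1) + t := by omega
        rw [h1, h2]
      · -- a = 1
        obtain rfl : a = 1 := by omega
        by_cases hm : 0 < m
        · -- wrap back to the last session with value c-1 everywhere
          rw [if_pos (by constructor <;> [omega; exact_mod_cast hm])]
          have hc2 : 2 ≤ c := by
            by_contra hcon
            rw [not_le] at hcon
            have h1 : ((1:Int)+(t:Int)) * c ≤ ((1:Int)+(t:Int)) * 1 :=
              mul_le_mul_of_nonneg_left (by omega) (by positivity)
            push_cast at hb
            linarith
          have hcaps2 : List.replicate (1-1) c ++ List.replicate (t+1) (c - 1)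
              = List.replicate (t+1) (c-1) ++ List.replicate 0 ((c-1) - 1) := by simp
          have hS : (((1:Nat) : Int) + (t : Int)) - 1 = (((t + 1 : Nat) : Int)) - 1 := by push_cast; ring
          have hS2 : (((1:Nat) : Int) + (t : Int)) = (((t + 1 : Nat) : Int) + ((0 : Nat) : Int)) := by push_cast; ring
          rw [hcaps2, hS, hS2]
          have hside2 : ((m : Nat) : Int) + ((0 : Nat) : Int) ≤ (((t+1 : Nat) : Int) + ((0 : Nat) : Int)) * (c - 1) := by
            push_cast
            have key : ((t:Int) + 1 + 0) * (c - 1) = ((1:Int) + (t:Int)) * c - (1 + (t:Int)) := by ring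
            rw [key]
            push_cast at hb
            linarith
          rw [ih m (t+1) 0 (c-1) (by omega) (by omega) (by omega) hside2]
          have h1 : (t + 1) + 0 = 1 + t := by omega
          have h2 : m + 0 = m := by omega
          rw [h1, h2]
          have h3 : ((m + 1) + t) % (1 + t) = m % (1 + t) := by
            have : (m + 1) + t = m + (1 + t) := by omega
            rw [this, Nat.add_mod_right]
          have h4 : ((m + 1) + t) / (1 + t) = m / (1 + t) + 1 := by
            have : (m + 1) + t = m + (1 + t) := by omega
            rw [this, Nat.add_div_right _ (by omega)]
          rw [h3, h4]
          have h5 : (c - 1 - ((m / (1 + t) : Nat) : Int)) = c - (((m / (1 + t) + 1 : Nat) : Int)) := by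
            push_cast; ring
          rw [h5]
        · -- m = 0: free exhausted, loop returns
          obtain rfl : m = 0 := by omega
          rw [if_neg (by intro hcon; simp at hcon)]
          rw [capLoopL_nonpos _ _ _ _ _ (by simp)]
          have h1 : ((0 + 1) + t) % (1 + t) = 0 := by
            rw [Nat.add_comm 0 1, Nat.mod_self]
          have h2 : ((0 + 1) + t) / (1 + t) = 1 := by
            rw [Nat.add_comm 0 1, Nat.div_self (by omega)]
          rw [h1, h2]
          simp only [Nat.sub_zero, Nat.add_comm 1 t, List.replicate_succ']
          simp

-- Both ports, specialised to a common session count S with tm ≤ S*rooms: loop = closed form.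
theorem ports_agree_core (S rooms tm : Int) (hr : 1 ≤ rooms) (htm : 0 ≤ tm)
    (hS1 : 1 ≤ S) (hle : tm ≤ S * rooms) :
    capLoopL ((S * rooms - tm).toNat + 1) S (List.replicate S.toNat rooms) (S * rooms - tm) (S - 1)
      = List.replicate (S - PySem.Int.mod (S * rooms - tm) S).toNat (rooms - PySem.Int.floordiv (S * rooms - tm) S)
        ++ List.replicate (PySem.Int.mod (S * rooms - tm) S).toNat (rooms - PySem.Int.floordiv (S * rooms - tm) S - 1) := by
  set a := S.toNat with ha
  set n := (S * rooms - tm).toNat with hn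
  have haS : ((a : Nat) : Int) = S := Int.toNat_of_nonneg (by omega)
  have hnf : ((n : Nat) : Int) = S * rooms - tm := Int.toNat_of_nonneg (by nlinarith)
  have hmain := capLoopL_closed (n+1) n a 0 rooms (by omega) (by omega) (by omega)
      (by simp only [Nat.cast_zero, add_zero]; rw [haS, hnf]; linarith)
  simp only [Nat.cast_zero, add_zero, List.replicate_zero, List.append_nil] at hmain
  rw [haS, hnf] at hmain
  have hfd : PySem.Int.floordiv (S * rooms - tm) S = ((n / a : Nat) : Int) := by
    rw [← hnf, ← haS]; exact_mod_cast PySem.Int.floordiv_natCast n a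
  have hmd : PySem.Int.mod (S * rooms - tm) S = ((n % a : Nat) : Int) := by
    rw [← hnf, ← haS]; exact_mod_cast PySem.Int.mod_natCast n a
  have hmla : n % a ≤ a := le_of_lt (Nat.mod_lt _ (by omega))
  rw [hfd, hmd, show (S - ((n % a : Nat) : Int)).toNat = a - n % a by omega,
    show (((n % a : Nat) : Int)).toNat = n % a by omega]
  exact hmain

theorem capLoopL_nil (f : Nat) (S free i : Int) (hi : i < 0) :
    capLoopL f S [] free i = [] := by
  cases f with
  | zero => rfl
  | succ f => simp [capLoopL]; omega

-- divmod? with a nonzero divisor is the (floordiv, mod) pair.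
theorem divmod_some (a b : Int) (h : b ≠ 0) :
    PySem.Int.divmod? a b = some (PySem.Int.floordiv a b, PySem.Int.mod a b) := by
  simp [PySem.Int.divmod?, PySem.Int.floordiv, PySem.Int.mod, h]

-- On rooms ≤ -1 ≤ -rooms ≤ tm both programs compute a nonpositive session count and return [].
theorem ports_agree_empty (rooms tm ms : Int) (hr : rooms ≤ -1) (htm : -rooms ≤ tm) :
    capacities_with_free_spread_at_end rooms tm ms
      = capacities_with_free_spread_at_end_alt rooms tm ms := by
  unfold capacities_with_free_spread_at_end capacities_with_free_spread_at_end_alt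
  have hmax : 2 ≤ max 2 ms := le_max_left _ _
  have hcond : (max 2 ms) * rooms < tm := by nlinarith
  simp only [if_pos hcond]
  have hkm := PySem.Int.floordiv_mul_add_mod (-tm) rooms
  have hmb := PySem.Int.mod_neg_bounds (-tm) (by omega : rooms < 0)
  have hk1 : 1 ≤ PySem.Int.floordiv (-tm) rooms := by
    by_contra hcon
    have hk0 : PySem.Int.floordiv (-tm) rooms ≤ 0 := by omega
    have : 0 ≤ PySem.Int.floordiv (-tm) rooms * rooms := by nlinarith
    omega
  have hSneg : -(PySem.Int.floordiv (-tm) rooms) ≤ -1 := by omega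
  rw [divmod_some _ _ (by omega : -(PySem.Int.floordiv (-tm) rooms) ≠ 0)]
  have hmb2 := PySem.Int.mod_neg_bounds
    (-(PySem.Int.floordiv (-tm) rooms) * rooms - tm) (by omega : -(PySem.Int.floordiv (-tm) rooms) < 0)
  rw [capLoopA_toList, Array.toList_replicate,
    show (-(PySem.Int.floordiv (-tm) rooms)).toNat = 0 by omega]
  simp only [List.replicate_zero]
  rw [capLoopL_nil _ _ _ _ (by omega),
    show (-(PySem.Int.floordiv (-tm) rooms)
      - PySem.Int.mod (-(PySem.Int.floordiv (-tm) rooms) * rooms - tm)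
          (-(PySem.Int.floordiv (-tm) rooms))).toNat = 0 by omega,
    show (PySem.Int.mod (-(PySem.Int.floordiv (-tm) rooms) * rooms - tm)
          (-(PySem.Int.floordiv (-tm) rooms))).toNat = 0 by omega]
  simp


-- Exact fit: zero free slots — A's loop body never runs, B's divmod is (0, 0).
theorem ports_agree_free0 (S rooms : Int) (hS : 1 ≤ S) :
    capLoopL 1 S (List.replicate S.toNat rooms) 0 (S - 1)
      = List.replicate (S - PySem.Int.mod 0 S).toNat (rooms - PySem.Int.floordiv 0 S)
        ++ List.replicate (PySem.Int.mod 0 S).toNat (rooms - PySem.Int.floordiv 0 S - 1) := by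
  have ha : ((S.toNat : Nat) : Int) = S := Int.toNat_of_nonneg (by omega)
  have hfd : PySem.Int.floordiv 0 S = 0 := by
    have h := PySem.Int.floordiv_natCast 0 S.toNat
    rw [← ha]; simpa using h
  have hmd : PySem.Int.mod 0 S = 0 := by
    have h := PySem.Int.mod_natCast 0 S.toNat
    rw [← ha]; simpa using h
  rw [capLoopL_nonpos _ _ _ _ _ le_rfl, hfd, hmd]
  simp

-- ===== VERDICT (by name: the statement is the Claim_ definition above) =====
theorem capacities_with_free_spread_at_end_spec : Claim_equal_capacities_with_free_spread_at_end := by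
  intro rooms tm ms _hdom hpre
  unfold Spec_capacities_with_free_spread_at_end
  rcases hpre with ⟨hr, htm⟩ | ⟨hr, htm⟩ | hfit | ⟨hr, htm, hlt, hdvd⟩
  case inr.inl => exact ports_agree_empty rooms tm ms hr htm
  case inr.inr.inl =>
    -- total_matches = S0 * rooms: the first branch is not taken and free_slots = 0
    unfold capacities_with_free_spread_at_end capacities_with_free_spread_at_end_alt
    simp only [if_neg (by omega : ¬ (max 2 ms) * rooms < tm)]
    rw [divmod_some _ _ (by have := le_max_left 2 ms; omega : (max 2 ms : Int) ≠ 0),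
      capLoopA_toList, Array.toList_replicate,
      show (max 2 ms) * rooms - tm = 0 by omega, show ((0:Int).toNat + 1) = 1 from rfl]
    exact ports_agree_free0 _ rooms (by have := le_max_left 2 ms; omega)
  case inr.inr.inr =>
    -- rooms ∣ tm with rooms, tm < 0 and S0*rooms < tm: the bumped S satisfies S*rooms = tm exactly
    unfold capacities_with_free_spread_at_end capacities_with_free_spread_at_end_alt
    simp only [if_pos hlt]
    have hkm := PySem.Int.floordiv_mul_add_mod (-tm) rooms
    have hmb := PySem.Int.mod_neg_bounds (-tm) (by omega : rooms < 0)
    have hmd0 : PySem.Int.mod (-tm) rooms = 0 := by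
      obtain ⟨k, hk⟩ := hdvd
      have hdm : rooms ∣ PySem.Int.mod (-tm) rooms := by
        have h2 : PySem.Int.mod (-tm) rooms = -tm - PySem.Int.floordiv (-tm) rooms * rooms := by omega
        rw [h2, hk]
        exact dvd_sub (dvd_neg.mpr (Dvd.intro k rfl)) (Dvd.intro_left _ rfl)
      obtain ⟨j, hj⟩ := hdm
      have hj0 : j = 0 := by
        by_contra hne
        rcases lt_or_gt_of_ne hne with hneg | hpos
        · nlinarith [hmb.2, hj]
        · nlinarith [hmb.1, hj]
      rw [hj, hj0, mul_zero]
    have hSr : -(PySem.Int.floordiv (-tm) rooms) * rooms = tm := by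
      have : -(PySem.Int.floordiv (-tm) rooms) * rooms = -(PySem.Int.floordiv (-tm) rooms * rooms) := by ring
      omega
    have hS1 : 1 ≤ -(PySem.Int.floordiv (-tm) rooms) := by nlinarith
    rw [divmod_some _ _ (by omega : -(PySem.Int.floordiv (-tm) rooms) ≠ 0),
      capLoopA_toList, Array.toList_replicate,
      show -(PySem.Int.floordiv (-tm) rooms) * rooms - tm = 0 by omega,
      show ((0:Int).toNat + 1) = 1 from rfl]
    exact ports_agree_free0 _ rooms hS1
  unfold capacities_with_free_spread_at_end capacities_with_free_spread_at_end_alt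
  by_cases hcond : (max 2 ms) * rooms < tm
  · simp only [if_pos hcond]
    rw [capLoopA_toList, Array.toList_replicate]
    have hkey : -(PySem.Int.floordiv (-tm) rooms) * rooms
        = tm + PySem.Int.mod (-tm) rooms := by
      have h1 := PySem.Int.floordiv_mul_add_mod (-tm) rooms
      have h2 : -(PySem.Int.floordiv (-tm) rooms) * rooms
          = -(PySem.Int.floordiv (-tm) rooms * rooms) := by ring
      omega
    have h2 := PySem.Int.mod_nonneg (-tm) (by omega : (0:Int) < rooms)
    have hle : tm ≤ -(PySem.Int.floordiv (-tm) rooms) * rooms := by omega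
    have hS1 : 1 ≤ -(PySem.Int.floordiv (-tm) rooms) := by
      have hmax : 2 ≤ max 2 ms := le_max_left _ _
      have hge2 : 2 ≤ (max 2 ms) * rooms := by nlinarith
      by_contra hcon
      have hS0 : -(PySem.Int.floordiv (-tm) rooms) ≤ 0 := by omega
      nlinarith
    rw [divmod_some _ _ (by omega : -(PySem.Int.floordiv (-tm) rooms) ≠ 0)]
    exact ports_agree_core _ rooms tm hr htm hS1 hle
  · simp only [if_neg hcond]
    rw [divmod_some _ _ (by have := le_max_left 2 ms; omega : (max 2 ms : Int) ≠ 0),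
      capLoopA_toList, Array.toList_replicate]
    exact ports_agree_core _ rooms tm hr htm
      (by have := le_max_left 2 ms; nlinarith) (by omega)
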